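-- pv_equiv track=rewrite | github.com/pypi-data/pypi-mirror-160 | packages/c1algo2/c1algo2-1.0.1.tar.gz/c1algo2-1.0.1/src/c1algo2/data.py | model_1_output
-- ===== SOURCE A (Python) =====
-- import copy
--
-- def model_1_output(input_file: dict) -> dict:
--     # use deepcopy to change iterable objects in the dictionary
--     output = copy.deepcopy(input_file)
--     for course in output:
--         for year in output[course]:
--             output[course][year]["Year_Enrollment"] = 0
--             output[course][year]["Year_MaxEnrollment"] = 0
--
--             for term in ("Fall", "Spring", "Summer"):
--                 if f"{term}_Enrollment" in output[course][year]:
--                     output[course][year]["Year_Enrollment"] += output[course][year][f"{term}_Enrollment"]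
--                     output[course][year]["Year_MaxEnrollment"] += output[course][year][f"{term}_MaxEnrollment"]
--                     output[course][year].pop(f"{term}_Enrollment")
--                     output[course][year].pop(f"{term}_MaxEnrollment")
--
--     return output
-- ===== SOURCE B (Python) =====
-- import copy
--
-- TERMS = ("Fall", "Spring", "Summer")
--
-- def model_1_output(input_file: dict) -> dict:
--     # Build a fresh output instead of deepcopy-then-mutate: for each year dict,
--     # sum the present terms' enrollments once, drop their keys, append the totals.
--     output = {}
--     for course, years in input_file.items():
--         new_years = {}
--         for year, data in years.items():
--             present = [t for t in TERMS if f"{t}_Enrollment" in data]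
--             removed = {f"{t}_{suffix}" for t in present
--                        for suffix in ("Enrollment", "MaxEnrollment")}
--             new_data = {k: copy.deepcopy(v) for k, v in data.items()
--                         if k not in removed}
--             new_data["Year_Enrollment"] = sum(data[f"{t}_Enrollment"] for t in present)
--             new_data["Year_MaxEnrollment"] = sum(data[f"{t}_MaxEnrollment"] for t in present)
--             new_years[year] = new_data
--         output[course] = new_years
--     return output
-- ===== Notes on version B (the rewrite author's own statement) =====
-- stated objective: alternative
-- what changed: A deepcopies the input and mutates each year dict in place (insert two zero counters, then per term accumulate into them and pop the term keys); B rebuilds each year dict in one pass: it filters out the present terms' key pairs and appends the two totals computed by summing over the present terms.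
import Mathlib
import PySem

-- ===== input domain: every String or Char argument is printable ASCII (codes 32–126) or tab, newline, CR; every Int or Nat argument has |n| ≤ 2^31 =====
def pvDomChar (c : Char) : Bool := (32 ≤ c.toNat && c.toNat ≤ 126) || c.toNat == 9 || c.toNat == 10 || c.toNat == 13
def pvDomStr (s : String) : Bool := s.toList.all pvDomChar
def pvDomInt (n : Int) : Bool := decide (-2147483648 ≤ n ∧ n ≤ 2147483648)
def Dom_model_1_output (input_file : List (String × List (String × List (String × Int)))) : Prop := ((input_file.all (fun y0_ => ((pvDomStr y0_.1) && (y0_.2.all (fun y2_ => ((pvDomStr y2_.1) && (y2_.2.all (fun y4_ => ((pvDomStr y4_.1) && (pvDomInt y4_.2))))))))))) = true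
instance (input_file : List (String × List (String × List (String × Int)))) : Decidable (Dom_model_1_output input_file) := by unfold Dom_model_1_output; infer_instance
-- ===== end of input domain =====

-- B replaces A's deepcopy-then-mutate loop by a single rebuild of each year dict
-- (filter out the term keys once, append the two precomputed sums): objective 'alternative'.

-- ===== PORT A =====
-- Dicts are ported as PySem.Dict over the association lists. `.pop(k)` is ported as `erase k`
-- (the popped value is unused); the reads `d[k]` are ported as `getD d k 0`: both are exact
-- because the keys read/popped are present (the `contains` guard, resp. Pre_ below).

-- the body of A's inner `for term in ("Fall","Spring","Summer")` loop
def model_1_stepA (d : PySem.Dict String Int) (term : String) : PySem.Dict String Int :=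
  if d.contains (term ++ "_Enrollment") then
    let d1 := d.insert "Year_Enrollment" (d.getD "Year_Enrollment" 0 + d.getD (term ++ "_Enrollment") 0)
    let d2 := d1.insert "Year_MaxEnrollment" (d1.getD "Year_MaxEnrollment" 0 + d1.getD (term ++ "_MaxEnrollment") 0)
    (d2.erase (term ++ "_Enrollment")).erase (term ++ "_MaxEnrollment")
  else d

-- A's per-year mutation of the deepcopied dict (int values, so deepcopy = the values themselves)
def model_1_yearA (data : List (String × Int)) : List (String × Int) :=
  let d := PySem.Dict.mk data
  let d := d.insert "Year_Enrollment" 0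
  let d := d.insert "Year_MaxEnrollment" 0
  (["Fall", "Spring", "Summer"].foldl model_1_stepA d).items

def model_1_output (input_file : List (String × List (String × List (String × Int)))) : List (String × List (String × List (String × Int))) :=
  input_file.map (fun course => (course.1, course.2.map (fun year => (year.1, model_1_yearA year.2))))

-- ===== PORT B =====
-- B's per-year rebuild: keep the non-term entries, then append the two sums.
def model_1_yearB (data : List (String × Int)) : List (String × Int) :=
  let d := PySem.Dict.mk data
  let present := ["Fall", "Spring", "Summer"].filter (fun t => d.contains (t ++ "_Enrollment"))
  let removed : PySem.Set String :=
    PySem.Set.ofList (present.flatMap (fun t => [t ++ "_Enrollment", t ++ "_MaxEnrollment"]))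
  let nd := PySem.Dict.mk (data.filter (fun p => !(PySem.Set.contains removed p.1)))
  let nd := nd.insert "Year_Enrollment" (present.map (fun t => d.getD (t ++ "_Enrollment") 0)).sum
  let nd := nd.insert "Year_MaxEnrollment" (present.map (fun t => d.getD (t ++ "_MaxEnrollment") 0)).sum
  nd.items

def model_1_output_alt (input_file : List (String × List (String × List (String × Int)))) : List (String × List (String × List (String × Int))) :=
  input_file.map (fun course => (course.1, course.2.map (fun year => (year.1, model_1_yearB year.2))))

-- ===== PRECONDITION & SPEC =====
-- Pre_ excludes exactly the inputs where some year dict has a {term}_Enrollment key without the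
-- matching {term}_MaxEnrollment key: there the Python A raises KeyError (and B raises too).
def Pre_model_1_output (input_file : List (String × List (String × List (String × Int)))) : Prop :=
  (input_file.all (fun course => course.2.all (fun year =>
    (!(year.2.any (fun p => p.1 == "Fall_Enrollment")) || year.2.any (fun p => p.1 == "Fall_MaxEnrollment")) &&
    (!(year.2.any (fun p => p.1 == "Spring_Enrollment")) || year.2.any (fun p => p.1 == "Spring_MaxEnrollment")) &&
    (!(year.2.any (fun p => p.1 == "Summer_Enrollment")) || year.2.any (fun p => p.1 == "Summer_MaxEnrollment"))))) = true
instance (input_file : List (String × List (String × List (String × Int)))) : Decidable (Pre_model_1_output input_file) := by unfold Pre_model_1_output; infer_instance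

def pvWitness_model_1_output : (List (String × List (String × List (String × Int)))) :=
  [("CSC110", [("2019", [("Fall_Enrollment", 100), ("Fall_MaxEnrollment", 120), ("Sections", 3)]),
               ("2020", [("Spring_Enrollment", 50), ("Spring_MaxEnrollment", 60)])])]

def Spec_model_1_output (input_file : List (String × List (String × List (String × Int)))) (out : List (String × List (String × List (String × Int)))) : Prop := out = model_1_output_alt input_file
instance (input_file : List (String × List (String × List (String × Int)))) (out : List (String × List (String × List (String × Int)))) : Decidable (Spec_model_1_output input_file out) := by unfold Spec_model_1_output; infer_instance

-- ===== CLAIM (what is proved, stated in full; the proofs are below) =====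
def Claim_equal_model_1_output : Prop := ∀ (input_file : List (String × List (String × List (String × Int)))), Dom_model_1_output input_file → Pre_model_1_output input_file → Spec_model_1_output input_file (model_1_output input_file)

-- ===== LEMMAS AND PROOFS =====

-- small facts about Dict.erase (not in the PySem lemma book)
theorem pv_contains_erase_of_ne {κ ν : Type} [BEq κ] [LawfulBEq κ] (d : PySem.Dict κ ν) (k k' : κ)
    (h : k' ≠ k) : (d.erase k).contains k' = d.contains k' := by
  obtain ⟨l⟩ := d
  simp only [PySem.Dict.erase, PySem.Dict.contains]
  induction l with
  | nil => rfl
  | cons p l ih =>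
    by_cases hp : p.1 = k
    · have h2 : (p.1 == k') = false := by simp [hp]; intro hh; exact h hh.symm
      rw [List.filter_cons_of_neg (by simp [hp]), List.any_cons, h2, Bool.false_or, ih]
    · rw [List.filter_cons_of_pos (by simp [hp]), List.any_cons, List.any_cons, ih]

theorem pv_get?_erase_of_ne {κ ν : Type} [BEq κ] [LawfulBEq κ] (d : PySem.Dict κ ν) (k k' : κ)
    (h : k' ≠ k) : (d.erase k).get? k' = d.get? k' := by
  obtain ⟨l⟩ := d
  simp only [PySem.Dict.erase, PySem.Dict.get?]
  induction l with
  | nil => rfl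
  | cons p l ih =>
    by_cases hp : p.1 = k
    · have h2 : (p.1 == k') = false := by simp [hp]; intro hh; exact h hh.symm
      rw [List.filter_cons_of_neg (by simp [hp]), ih, List.find?_cons_of_neg (by simp [h2])]
    · rw [List.filter_cons_of_pos (by simp [hp])]
      by_cases hq : (p.1 == k') = true
      · rw [List.find?_cons_of_pos (p := fun q : κ × ν => q.1 == k') hq,
            List.find?_cons_of_pos (p := fun q : κ × ν => q.1 == k') hq]
      · rw [List.find?_cons_of_neg (p := fun q : κ × ν => q.1 == k') hq,
            List.find?_cons_of_neg (p := fun q : κ × ν => q.1 == k') hq, ih]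

theorem pv_getD_erase_of_ne {κ ν : Type} [BEq κ] [LawfulBEq κ] (d : PySem.Dict κ ν) (k k' : κ)
    (v : ν) (h : k' ≠ k) : (d.erase k).getD k' v = d.getD k' v := by
  simp [PySem.Dict.getD, pv_get?_erase_of_ne d k k' h]

theorem pv_erase_insert_comm {κ ν : Type} [BEq κ] [LawfulBEq κ] (d : PySem.Dict κ ν) (k k' : κ)
    (v : ν) (hne : k ≠ k') : (d.insert k' v).erase k = (d.erase k).insert k' v := by
  apply PySem.Dict.ext
  by_cases hc : d.contains k' = true
  · have hc' : (d.erase k).contains k' = true := by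
      rw [pv_contains_erase_of_ne d k k' (Ne.symm hne)]; exact hc
    rw [show ((d.erase k).insert k' v).items = (d.erase k).items.map (fun p => if p.1 == k' then (k', v) else p) from PySem.Dict.items_insert_of_contains _ _ hc']
    rw [show ((d.insert k' v).erase k).items = ((d.insert k' v).items.filter (fun p => !(p.1 == k))) from rfl]
    rw [PySem.Dict.items_insert_of_contains _ _ hc]
    rw [show ((d.erase k).items = d.items.filter (fun p => !(p.1 == k))) from rfl]
    rw [List.filter_map]
    rw [List.filter_congr (q := fun p => !(p.1 == k)) ?_]
    · intro p _
      by_cases hp : p.1 = k'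
      · have h1 : (k' == k) = false := by simp; exact fun hh => hne hh.symm
        simp [Function.comp, hp, h1]
      · simp [Function.comp, hp]
  · have hc' : (d.erase k).contains k' = false := by
      rw [pv_contains_erase_of_ne d k k' (Ne.symm hne)]; exact Bool.eq_false_iff.mpr hc
    rw [show ((d.erase k).insert k' v).items = (d.erase k).items ++ [(k', v)] from PySem.Dict.items_insert_of_not_contains _ _ (by simp [hc'])]
    rw [show ((d.insert k' v).erase k).items = ((d.insert k' v).items.filter (fun p => !(p.1 == k))) from rfl]
    rw [PySem.Dict.items_insert_of_not_contains _ _ (by simp [Bool.eq_false_iff.mpr hc])]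
    rw [List.filter_append]
    have : (([(k', v)] : List (κ × ν)).filter (fun p => !(p.1 == k))) = [(k', v)] := by
      simp; exact fun hh => hne hh.symm
    rw [this]
    rfl

theorem pv_insert_comm_of_contains {κ ν : Type} [BEq κ] [LawfulBEq κ] (d : PySem.Dict κ ν)
    (k k' : κ) (v b : ν) (hne : k ≠ k') (hcont : d.contains k = true) :
    (d.insert k' b).insert k v = (d.insert k v).insert k' b := by
  apply PySem.Dict.ext
  have c1 : (d.insert k' b).contains k = true := by
    rw [PySem.Dict.contains_insert]; simp [hcont]
  by_cases hc' : d.contains k' = true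
  · have c2 : (d.insert k v).contains k' = true := by
      rw [PySem.Dict.contains_insert]; simp [hc']
    rw [PySem.Dict.items_insert_of_contains _ _ c1, PySem.Dict.items_insert_of_contains _ _ hc',
        PySem.Dict.items_insert_of_contains _ _ c2, PySem.Dict.items_insert_of_contains _ _ hcont]
    rw [List.map_map, List.map_map]
    apply List.map_congr_left
    intro p _
    by_cases h1 : p.1 = k
    · have : (k : κ) ≠ k' := hne
      simp [Function.comp, h1, (by simp; exact fun hh => hne hh : ((k == k') = false))]
    · by_cases h2 : p.1 = k'
      · have : (k' == k) = false := by simp; exact fun hh => hne hh.symm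
        simp [Function.comp, h2, this]
      · simp [Function.comp, h1, h2]
  · have c2 : (d.insert k v).contains k' = false := by
      rw [PySem.Dict.contains_insert]
      simp [Bool.eq_false_iff.mpr hc']; exact fun hh => hne hh.symm
    rw [PySem.Dict.items_insert_of_contains _ _ c1,
        PySem.Dict.items_insert_of_not_contains _ _ (by simp [Bool.eq_false_iff.mpr hc']),
        PySem.Dict.items_insert_of_not_contains _ _ (by simp [c2]),
        PySem.Dict.items_insert_of_contains _ _ hcont]
    rw [List.map_append]
    have hkk : ((k' == k) = false) := by simp; exact fun hh => hne hh.symm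
    congr 1
    simp [hkk]

-- fold of erases = one filter over the association list
def pvEraseFold {κ ν : Type} [BEq κ] (d : PySem.Dict κ ν) (ks : List κ) : PySem.Dict κ ν :=
  ks.foldl PySem.Dict.erase d

theorem pv_eraseFold_mk_filter {κ ν : Type} [BEq κ] [LawfulBEq κ] (l : List (κ × ν)) (ks : List κ) :
    pvEraseFold (PySem.Dict.mk l) ks = PySem.Dict.mk (l.filter (fun p => !(ks.contains p.1))) := by
  induction ks generalizing l with
  | nil =>
    show PySem.Dict.mk l = PySem.Dict.mk (List.filter (fun p => !(([] : List κ).contains p.1)) l)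
    congr 1
    rw [show (fun p : κ × ν => !(([] : List κ).contains p.1)) = (fun _ => true) from
      funext (fun _ => rfl)]
    simp
  | cons k ks ih =>
    simp only [pvEraseFold, List.foldl_cons, PySem.Dict.erase] at *
    rw [ih]
    congr 1
    rw [List.filter_filter]
    apply List.filter_congr
    intro p _
    by_cases h : p.1 = k <;> simp [h]

-- the invariant of A's term loop: starting from C with the two Year keys set to a and b,
-- the loop equals "erase the present term keys, add the term sums to a and b"
theorem pv_loopA_eq (ts : List String) (C : PySem.Dict String Int) (a b : Int)
    (hk : ∀ t ∈ ts, t ++ "_Enrollment" ≠ "Year_Enrollment" ∧ t ++ "_Enrollment" ≠ "Year_MaxEnrollment" ∧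
                    t ++ "_MaxEnrollment" ≠ "Year_Enrollment" ∧ t ++ "_MaxEnrollment" ≠ "Year_MaxEnrollment")
    (hp : ts.Pairwise (fun t t' => t' ++ "_Enrollment" ≠ t ++ "_Enrollment" ∧ t' ++ "_Enrollment" ≠ t ++ "_MaxEnrollment" ∧
                                   t' ++ "_MaxEnrollment" ≠ t ++ "_Enrollment" ∧ t' ++ "_MaxEnrollment" ≠ t ++ "_MaxEnrollment")) :
    ts.foldl model_1_stepA ((C.insert "Year_Enrollment" a).insert "Year_MaxEnrollment" b)
    = ((pvEraseFold C ((ts.filter (fun t => C.contains (t ++ "_Enrollment"))).flatMap (fun t => [t ++ "_Enrollment", t ++ "_MaxEnrollment"]))).insert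
         "Year_Enrollment" (a + ((ts.filter (fun t => C.contains (t ++ "_Enrollment"))).map (fun t => C.getD (t ++ "_Enrollment") 0)).sum)).insert
         "Year_MaxEnrollment" (b + ((ts.filter (fun t => C.contains (t ++ "_Enrollment"))).map (fun t => C.getD (t ++ "_MaxEnrollment") 0)).sum) := by
  induction ts generalizing C a b with
  | nil =>
    simp only [List.foldl_nil, List.filter_nil, List.flatMap_nil, List.map_nil, List.sum_nil,
      add_zero]
    rfl
  | cons t ts ih =>
    obtain ⟨h1, h2, h3, h4⟩ := hk t (List.mem_cons_self ..)
    have hk' : ∀ t' ∈ ts, t' ++ "_Enrollment" ≠ "Year_Enrollment" ∧ t' ++ "_Enrollment" ≠ "Year_MaxEnrollment" ∧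
        t' ++ "_MaxEnrollment" ≠ "Year_Enrollment" ∧ t' ++ "_MaxEnrollment" ≠ "Year_MaxEnrollment" :=
      fun t' h => hk t' (List.mem_cons_of_mem _ h)
    rw [List.pairwise_cons] at hp
    obtain ⟨hcross, hp'⟩ := hp
    have hYEYM : ("Year_Enrollment" : String) ≠ "Year_MaxEnrollment" := by decide
    have hScont : (((C.insert "Year_Enrollment" a).insert "Year_MaxEnrollment" b).contains (t ++ "_Enrollment")) = C.contains (t ++ "_Enrollment") := by
      rw [PySem.Dict.contains_insert, PySem.Dict.contains_insert]
      have b1 : ((t ++ "_Enrollment") == "Year_MaxEnrollment") = false := by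
        rw [beq_eq_false_iff_ne]; exact h2
      have b2 : ((t ++ "_Enrollment") == "Year_Enrollment") = false := by
        rw [beq_eq_false_iff_ne]; exact h1
      rw [b1, b2, Bool.false_or, Bool.false_or]
    simp only [List.foldl_cons]
    by_cases hc : C.contains (t ++ "_Enrollment") = true
    · -- the term is present: the step fires
      have hstep : model_1_stepA ((C.insert "Year_Enrollment" a).insert "Year_MaxEnrollment" b) t
          = ((((C.erase (t ++ "_Enrollment")).erase (t ++ "_MaxEnrollment")).insert "Year_Enrollment" (a + C.getD (t ++ "_Enrollment") 0)).insert "Year_MaxEnrollment" (b + C.getD (t ++ "_MaxEnrollment") 0)) := by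
        simp only [model_1_stepA]
        rw [hScont, if_pos hc]
        have e1 : (((C.insert "Year_Enrollment" a).insert "Year_MaxEnrollment" b).getD "Year_Enrollment" 0) = a := by
          rw [PySem.Dict.getD_insert_of_ne _ _ _ hYEYM, PySem.Dict.getD_insert_self]
        have e2 : (((C.insert "Year_Enrollment" a).insert "Year_MaxEnrollment" b).getD (t ++ "_Enrollment") 0) = C.getD (t ++ "_Enrollment") 0 := by
          rw [PySem.Dict.getD_insert_of_ne _ _ _ h2, PySem.Dict.getD_insert_of_ne _ _ _ h1]
        rw [e1, e2]
        -- rewrite the first insert to sit directly on C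
        have r1 : ((C.insert "Year_Enrollment" a).insert "Year_MaxEnrollment" b).insert "Year_Enrollment" (a + C.getD (t ++ "_Enrollment") 0)
            = (C.insert "Year_Enrollment" (a + C.getD (t ++ "_Enrollment") 0)).insert "Year_MaxEnrollment" b := by
          rw [pv_insert_comm_of_contains _ _ _ _ _ hYEYM (PySem.Dict.contains_insert_self _ _ _),
              PySem.Dict.insert_insert_self]
        rw [r1]
        have e3 : ((C.insert "Year_Enrollment" (a + C.getD (t ++ "_Enrollment") 0)).insert "Year_MaxEnrollment" b).getD "Year_MaxEnrollment" 0 = b :=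
          PySem.Dict.getD_insert_self ..
        have e4 : ((C.insert "Year_Enrollment" (a + C.getD (t ++ "_Enrollment") 0)).insert "Year_MaxEnrollment" b).getD (t ++ "_MaxEnrollment") 0 = C.getD (t ++ "_MaxEnrollment") 0 := by
          rw [PySem.Dict.getD_insert_of_ne _ _ _ h4, PySem.Dict.getD_insert_of_ne _ _ _ h3]
        rw [e3, e4, PySem.Dict.insert_insert_self]
        -- move the two erases inside
        rw [pv_erase_insert_comm _ _ _ _ h2, pv_erase_insert_comm _ _ _ _ h1,
            pv_erase_insert_comm _ _ _ _ h4, pv_erase_insert_comm _ _ _ _ h3]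
      rw [hstep, ih _ _ _ hk' hp']
      -- rewrite the C'-side quantities back to C
      have hfilter : ts.filter (fun t' => ((C.erase (t ++ "_Enrollment")).erase (t ++ "_MaxEnrollment")).contains (t' ++ "_Enrollment"))
          = ts.filter (fun t' => C.contains (t' ++ "_Enrollment")) := by
        apply List.filter_congr
        intro t' ht'
        obtain ⟨c1, c2, _, _⟩ := hcross t' ht'
        rw [pv_contains_erase_of_ne _ _ _ c2, pv_contains_erase_of_ne _ _ _ c1]
      have hmapE : (ts.filter (fun t' => C.contains (t' ++ "_Enrollment"))).map (fun t' => ((C.erase (t ++ "_Enrollment")).erase (t ++ "_MaxEnrollment")).getD (t' ++ "_Enrollment") 0)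
          = (ts.filter (fun t' => C.contains (t' ++ "_Enrollment"))).map (fun t' => C.getD (t' ++ "_Enrollment") 0) := by
        apply List.map_congr_left
        intro t' ht'
        obtain ⟨c1, c2, _, _⟩ := hcross t' (List.mem_of_mem_filter ht')
        rw [pv_getD_erase_of_ne _ _ _ _ c2, pv_getD_erase_of_ne _ _ _ _ c1]
      have hmapM : (ts.filter (fun t' => C.contains (t' ++ "_Enrollment"))).map (fun t' => ((C.erase (t ++ "_Enrollment")).erase (t ++ "_MaxEnrollment")).getD (t' ++ "_MaxEnrollment") 0)
          = (ts.filter (fun t' => C.contains (t' ++ "_Enrollment"))).map (fun t' => C.getD (t' ++ "_MaxEnrollment") 0) := by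
        apply List.map_congr_left
        intro t' ht'
        obtain ⟨_, _, c3, c4⟩ := hcross t' (List.mem_of_mem_filter ht')
        rw [pv_getD_erase_of_ne _ _ _ _ c4, pv_getD_erase_of_ne _ _ _ _ c3]
      rw [hfilter, hmapE, hmapM]
      have hfold : pvEraseFold ((C.erase (t ++ "_Enrollment")).erase (t ++ "_MaxEnrollment"))
            ((ts.filter (fun t' => C.contains (t' ++ "_Enrollment"))).flatMap (fun t' => [t' ++ "_Enrollment", t' ++ "_MaxEnrollment"]))
          = pvEraseFold C (((t :: ts).filter (fun t' => C.contains (t' ++ "_Enrollment"))).flatMap (fun t' => [t' ++ "_Enrollment", t' ++ "_MaxEnrollment"])) := by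
        rw [List.filter_cons_of_pos (p := fun t' => C.contains (t' ++ "_Enrollment")) hc]
        rfl
      rw [hfold, List.filter_cons_of_pos (p := fun t' => C.contains (t' ++ "_Enrollment")) hc,
          List.map_cons, List.map_cons, List.sum_cons, List.sum_cons, ← add_assoc, ← add_assoc]
    · -- the term is absent: the step is the identity
      have hstep : model_1_stepA ((C.insert "Year_Enrollment" a).insert "Year_MaxEnrollment" b) t
          = (C.insert "Year_Enrollment" a).insert "Year_MaxEnrollment" b := by
        simp only [model_1_stepA]
        rw [hScont, if_neg hc]
      rw [hstep, ih _ _ _ hk' hp',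
          List.filter_cons_of_neg (p := fun t' => C.contains (t' ++ "_Enrollment")) hc]

-- (PySem.Set.ofList used only for membership)
theorem pv_set_ofList_contains {κ : Type} [BEq κ] [LawfulBEq κ] (l : List κ) (x : κ) :
    PySem.Set.contains (PySem.Set.ofList l) x = l.contains x := by
  by_cases h : x ∈ l <;> simp [PySem.Set.mem_ofList, h]

theorem pv_year_eq (data : List (String × Int)) : model_1_yearA data = model_1_yearB data := by
  have hk : ∀ t ∈ ["Fall", "Spring", "Summer"],
      t ++ "_Enrollment" ≠ "Year_Enrollment" ∧ t ++ "_Enrollment" ≠ "Year_MaxEnrollment" ∧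
      t ++ "_MaxEnrollment" ≠ "Year_Enrollment" ∧ t ++ "_MaxEnrollment" ≠ "Year_MaxEnrollment" := by decide
  have hp : (["Fall", "Spring", "Summer"] : List String).Pairwise
      (fun t t' => t' ++ "_Enrollment" ≠ t ++ "_Enrollment" ∧ t' ++ "_Enrollment" ≠ t ++ "_MaxEnrollment" ∧
                   t' ++ "_MaxEnrollment" ≠ t ++ "_Enrollment" ∧ t' ++ "_MaxEnrollment" ≠ t ++ "_MaxEnrollment") := by decide
  simp only [model_1_yearA, model_1_yearB]
  rw [pv_loopA_eq _ _ 0 0 hk hp, pv_eraseFold_mk_filter]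
  have hflt : (data.filter (fun p => !((((["Fall", "Spring", "Summer"].filter (fun t => (PySem.Dict.mk data).contains (t ++ "_Enrollment"))).flatMap (fun t => [t ++ "_Enrollment", t ++ "_MaxEnrollment"]))).contains p.1)))
      = data.filter (fun p => !(PySem.Set.contains (PySem.Set.ofList ((["Fall", "Spring", "Summer"].filter (fun t => (PySem.Dict.mk data).contains (t ++ "_Enrollment"))).flatMap (fun t => [t ++ "_Enrollment", t ++ "_MaxEnrollment"]))) p.1)) := by
    apply List.filter_congr
    intro p _
    rw [pv_set_ofList_contains]
  rw [hflt]
  simp [zero_add]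

-- ===== VERDICT (by name: the statement is the Claim_ definition above) =====
theorem model_1_output_spec : Claim_equal_model_1_output := by
  intro input_file _ _
  unfold Spec_model_1_output model_1_output model_1_output_alt
  simp only [pv_year_eq]
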